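-- pv_equiv track=rewrite | github.com/SebastienDeriaz/adventofcode | 2025/day02/day02_02.py | smaller_or_equal_mn
-- ===== SOURCE A (Python) =====
-- def _l_base_leads(x : int, n : int):
--     s = str(x)
--     L = len(s)
--
--     size = L // n
--     if L % n != 0:
--         base = None
--         leads = []
--     else:
--         base = int(s[:size])
--         leads = []
--         for i in range(L // size):
--             if i == 0:
--                 continue
--             leads.append(
--                 int(s[size*i:size*(i+1)])
--             )
--
--     return L, base, leads
--
-- def smaller_or_equal_mn(x : int, n : int):
--     L, base, leads = _l_base_leads(x, n)
--
--     if base is None: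
--         return 10**(L//n)-1
--
--     if L == 1:
--         return 0
--
--     output = base
--
--     for lead in leads:
--         if lead > base:
--             break
--         elif lead == base:
--             continue
--         else:
--             output -= 1
--             break
--
--     return output
-- ===== SOURCE B (Python) =====
-- def smaller_or_equal_mn(x: int, n: int):
--     s = str(x)
--     L = len(s)
--     if L % n != 0:
--         return 10 ** (L // n) - 1
--     if L == 1:
--         return 0
--     size = L // n
--     base = int(s[:size])
--     # one right-to-left pass: does the chunk suffix compare strictly below base,base,...?
--     smaller = False
--     for i in range(n - 1, 0, -1):
--         c = int(s[size * i : size * i + size])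
--         smaller = c < base or (c == base and smaller)
--     return base - 1 if smaller else base
-- ===== Notes on version B (the rewrite author's own statement) =====
-- stated objective: simpler
-- what changed: B drops A's (L, base, leads) helper with its None-signalling, the intermediate leads list and the early-exit break/continue first-difference scan, and instead makes one right-to-left pass over the chunk positions carrying a boolean 'suffix of chunks is strictly smaller than base,base,...' flag, returning base-1 exactly when the flag ends true.
-- outside the precondition, e.g. on smaller_or_equal_mn(1234, -2): A returns 12, B returns 12; on smaller_or_equal_mn(12, -3): A returns -0.9, B returns -0.9; on smaller_or_equal_mn(-12, 3): A raises ValueError, B raises ValueError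
import Mathlib
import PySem

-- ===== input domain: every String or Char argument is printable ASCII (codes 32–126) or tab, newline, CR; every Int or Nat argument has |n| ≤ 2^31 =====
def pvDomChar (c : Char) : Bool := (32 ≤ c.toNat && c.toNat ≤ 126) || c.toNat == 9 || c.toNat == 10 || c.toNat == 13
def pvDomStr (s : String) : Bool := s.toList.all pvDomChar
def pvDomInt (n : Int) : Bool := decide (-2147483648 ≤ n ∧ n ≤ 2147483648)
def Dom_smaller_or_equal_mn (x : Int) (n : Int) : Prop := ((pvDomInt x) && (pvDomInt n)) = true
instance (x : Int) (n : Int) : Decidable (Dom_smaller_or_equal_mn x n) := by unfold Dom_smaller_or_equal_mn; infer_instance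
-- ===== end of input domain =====

-- B drops A's (L, base, leads) helper, the leads list and the early-exit first-difference
-- scan, and instead makes one right-to-left pass over the chunk positions carrying a
-- boolean 'suffix is strictly smaller' flag (objective: simpler; same cost).

-- ===== PORT A =====
-- port of _l_base_leads; an int() ValueError (a raise) is modelled as an overall `none`
def pvLBaseLeads (x : Int) (n : Int) : Option (Int × Option Int × List Int) :=
  let s := PySem.Int.toChars x
  let L : Int := (s.length : Int)
  let size := PySem.Int.floordiv L n
  if PySem.Int.mod L n ≠ 0 then
    some (L, none, [])
  else
    match PySem.Int.ofChars? (PySem.List.slice s none (some size)) with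
    | none => none
    | some base =>
      match (PySem.List.pyRange 0 (PySem.Int.floordiv L size) 1).foldl
          (fun acc i =>
            match acc with
            | none => none
            | some ls =>
              if i = 0 then some ls
              else
                match PySem.Int.ofChars? (PySem.List.slice s (some (size * i)) (some (size * (i + 1)))) with
                | none => none
                | some v => some (ls ++ [v])) (some []) with
      | none => none
      | some leads => some (L, some base, leads)

-- A's for-loop over leads: output starts at base, `break` keeps it, `-= 1; break` ends with base - 1
def pvALoop (base : Int) : List Int → Int
  | [] => base
  | lead :: rest =>
    if lead > base then base
    else if lead = base then pvALoop base rest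
    else base - 1

def smaller_or_equal_mn (x : Int) (n : Int) : Int :=
  match pvLBaseLeads x n with
  | none => 0   -- Python raises ValueError here; these inputs are excluded by Pre_
  | some (L, none, _) => 10 ^ (PySem.Int.floordiv L n).toNat - 1   -- exponent ≥ 0 under Pre_ (n ≥ 1)
  | some (L, some base, leads) => if L = 1 then 0 else pvALoop base leads

-- ===== PORT B =====
def smaller_or_equal_mn_alt (x : Int) (n : Int) : Int :=
  let s := PySem.Int.toChars x
  let L : Int := (s.length : Int)
  if PySem.Int.mod L n ≠ 0 then 10 ^ (PySem.Int.floordiv L n).toNat - 1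
  else if L = 1 then 0
  else
    let size := PySem.Int.floordiv L n
    match PySem.Int.ofChars? (PySem.List.slice s none (some size)) with
    | none => 0   -- Python raises ValueError here; these inputs are excluded by Pre_
    | some base =>
      -- the for-loop over range(n-1, 0, -1) carrying `smaller`; an int() ValueError is an overall `none`
      match (PySem.List.pyRange (n - 1) 0 (-1)).foldl
          (fun acc i =>
            match acc with
            | none => none
            | some smaller =>
              match PySem.Int.ofChars? (PySem.List.slice s (some (size * i)) (some (size * i + size))) with
              | none => none
              | some c => some (decide (c < base) || (decide (c = base) && smaller)))
          (some false) with
      | none => 0   -- ValueError; excluded by Pre_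
      | some smaller => if smaller then base - 1 else base

-- ===== PRECONDITION & SPEC =====
-- Pre_ excludes n ≤ 0 (A raises ZeroDivisionError at n = 0 and returns a float for most n < 0;
-- at the rare negative divisors of the digit count it returns an int that B matches anyway) and
-- negative x whose string length equals n, where int('-') raises ValueError in both A and B.
def Pre_smaller_or_equal_mn (x : Int) (n : Int) : Prop :=
  1 ≤ n ∧ (0 ≤ x ∨ ((PySem.Int.toChars x).length : Int) ≠ n)
instance (x : Int) (n : Int) : Decidable (Pre_smaller_or_equal_mn x n) := by
  unfold Pre_smaller_or_equal_mn; infer_instance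

def pvWitness_smaller_or_equal_mn : Int × Int := (1234, 2)

def Spec_smaller_or_equal_mn (x : Int) (n : Int) (out : Int) : Prop := out = smaller_or_equal_mn_alt x n
instance (x : Int) (n : Int) (out : Int) : Decidable (Spec_smaller_or_equal_mn x n out) := by
  unfold Spec_smaller_or_equal_mn; infer_instance

-- ===== CLAIM (what is proved, stated in full; the proofs are below) =====
def Claim_equal_smaller_or_equal_mn : Prop := ∀ (x : Int) (n : Int), Dom_smaller_or_equal_mn x n → Pre_smaller_or_equal_mn x n → Spec_smaller_or_equal_mn x n (smaller_or_equal_mn x n)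

-- ===== LEMMAS AND PROOFS =====

theorem pv_toChars_ne_nil (x : Int) : PySem.Int.toChars x ≠ [] := by
  unfold PySem.Int.toChars
  split
  · simp
  · have h := Nat.toDigits_eq_if (b := 10) (n := x.toNat) (by norm_num)
    rw [h]; split <;> simp

-- A's break/continue scan computes the same verdict as a right fold with a
-- 'strictly smaller suffix' boolean carry
theorem pv_aloop_eq_foldr (base : Int) (ls : List Int) :
    pvALoop base ls =
      if ls.foldr (fun c sm => decide (c < base) || (decide (c = base) && sm)) false then
        base - 1 else base := by
  induction ls with
  | nil => simp [pvALoop]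
  | cons l rest ih =>
    simp only [pvALoop, List.foldr_cons]
    rcases lt_trichotomy l base with h | h | h
    · rw [if_neg (by omega), if_neg (by omega), if_pos (by simp [h])]
    · subst h
      rw [if_neg (by omega), if_pos rfl, ih]
      by_cases hr : rest.foldr (fun c sm => decide (c < l) || (decide (c = l) && sm)) false
      · rw [if_pos hr, if_pos (by simp [hr])]
      · rw [if_neg hr, if_neg (by simp [hr])]
    · rw [if_pos (by omega), if_neg (by simp; omega)]

-- the parse-and-append folds of both ports, as a sequential map over (start, stop) pairs
def pvParseAll (s : List Char) : List (Int × Int) → Option (List Int)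
  | [] => some []
  | p :: r =>
    match PySem.Int.ofChars? (PySem.List.slice s (some p.1) (some p.2)) with
    | none => none
    | some v => (pvParseAll s r).map (v :: ·)

theorem pv_foldl_none_eq_none (s : List Char) (ps : List (Int × Int)) :
    ps.foldl
      (fun acc' p =>
        match acc' with
        | none => none
        | some ls =>
          match PySem.Int.ofChars? (PySem.List.slice s (some p.1) (some p.2)) with
          | none => none
          | some v => some (ls ++ [v])) none
    = none := by
  induction ps with
  | nil => rfl
  | cons p r ih => simpa using ih

theorem pv_foldl_eq_parseAll (s : List Char) (ps : List (Int × Int)) (acc : List Int) :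
    ps.foldl
      (fun acc' p =>
        match acc' with
        | none => none
        | some ls =>
          match PySem.Int.ofChars? (PySem.List.slice s (some p.1) (some p.2)) with
          | none => none
          | some v => some (ls ++ [v])) (some acc)
    = (pvParseAll s ps).map (acc ++ ·) := by
  induction ps generalizing acc with
  | nil => simp [pvParseAll]
  | cons p r ih =>
    simp only [List.foldl_cons, pvParseAll]
    cases hp : PySem.Int.ofChars? (PySem.List.slice s (some p.1) (some p.2)) with
    | none => simp only [pv_foldl_none_eq_none s r, Option.map_none]
    | some v =>
      simp only [ih]
      cases pvParseAll s r <;> simp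

theorem pv_foldl_comp (s : List Char) (f : Int → Int × Int) (l : List Int) (acc : List Int) :
    l.foldl
      (fun acc' i =>
        match acc' with
        | none => none
        | some ls =>
          match PySem.Int.ofChars? (PySem.List.slice s (some (f i).1) (some (f i).2)) with
          | none => none
          | some v => some (ls ++ [v])) (some acc)
    = (pvParseAll s (l.map f)).map (acc ++ ·) := by
  have h := pv_foldl_eq_parseAll s (l.map f) acc
  rw [List.foldl_map] at h
  exact h

-- A's leads loop (skipping i = 0) parses the windows [size*i, size*(i+1)) for i = 1 .. m-1
theorem pv_foldA_eq (s : List Char) (size m : Int) (hm : 0 < m) :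
    (PySem.List.pyRange 0 m 1).foldl
      (fun acc i =>
        match acc with
        | none => none
        | some ls =>
          if i = 0 then some ls
          else
            match PySem.Int.ofChars? (PySem.List.slice s (some (size * i)) (some (size * (i + 1)))) with
            | none => none
            | some v => some (ls ++ [v])) (some [])
    = (pvParseAll s ((PySem.List.pyRange 1 m 1).map (fun i => (size * i, size * (i + 1))))).map
        (fun t => [] ++ t) := by
  rw [PySem.List.pyRange_one_cons hm, List.foldl_cons]
  rw [show (0:Int) + 1 = 1 from rfl]
  rw [PySem.List.foldl_congr_mem (PySem.List.pyRange 1 m) _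
    (fun acc' i =>
      match acc' with
      | none => none
      | some ls =>
        match PySem.Int.ofChars? (PySem.List.slice s (some (size * i)) (some (size * (i + 1)))) with
        | none => none
        | some v => some (ls ++ [v])) _
    (by
      intro acc i hi
      have hne : i ≠ 0 := by have := PySem.List.mem_pyRange_one.mp hi; omega
      cases acc <;> simp [hne])]
  exact pv_foldl_comp s (fun i => (size * i, size * (i + 1))) _ []

-- B's countdown loop over the reversed index list is the right fold of the boolean carry
-- over the parsed chunk values
theorem pv_foldB_eq (s : List Char) (size base : Int) (l : List Int) :
    l.reverse.foldl
      (fun acc i =>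
        match acc with
        | none => none
        | some smaller =>
          match PySem.Int.ofChars? (PySem.List.slice s (some (size * i)) (some (size * i + size))) with
          | none => none
          | some c => some (decide (c < base) || (decide (c = base) && smaller))) (some false)
    = (pvParseAll s (l.map (fun i => (size * i, size * i + size)))).map
        (fun ls => ls.foldr (fun c sm => decide (c < base) || (decide (c = base) && sm)) false) := by
  rw [List.foldl_reverse]
  induction l with
  | nil => simp [pvParseAll]
  | cons i r ih =>
    simp only [List.foldr_cons, List.map_cons, pvParseAll, ih]
    cases hp : PySem.Int.ofChars? (PySem.List.slice s (some (size * i)) (some (size * i + size))) with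
    | none =>
      cases pvParseAll s (r.map (fun i => (size * i, size * i + size))) <;> simp
    | some c =>
      cases pvParseAll s (r.map (fun i => (size * i, size * i + size))) <;> simp

-- ===== VERDICT (by name: the statement is the Claim_ definition above) =====
theorem smaller_or_equal_mn_spec : Claim_equal_smaller_or_equal_mn := by
  intro x n _ hpre
  obtain ⟨hn, _⟩ := hpre
  unfold Spec_smaller_or_equal_mn smaller_or_equal_mn smaller_or_equal_mn_alt pvLBaseLeads
  simp only []
  by_cases hm : PySem.Int.mod ((PySem.Int.toChars x).length : Int) n = 0
  · rw [if_neg (not_not_intro hm), if_neg (not_not_intro hm)]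
    have hL1 : (1:Int) ≤ ((PySem.Int.toChars x).length : Int) := by
      have h := pv_toChars_ne_nil x
      have : 0 < (PySem.Int.toChars x).length := List.length_pos_iff.mpr h
      omega
    set s := PySem.Int.toChars x with hs
    set L : Int := (s.length : Int) with hLdef
    have hfm : PySem.Int.mod L n = L % n := by
      unfold PySem.Int.mod
      rw [Int.fmod_eq_emod, if_pos (Or.inl (by omega))]; ring
    have hfd : PySem.Int.floordiv L n = L / n := by
      unfold PySem.Int.floordiv
      rw [Int.fdiv_eq_ediv, if_pos (Or.inl (by omega))]; ring
    have hmod : L % n = 0 := by rw [← hfm]; exact hm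
    have hnL : n ≤ L := by
      by_contra h
      have : L % n = L := Int.emod_eq_of_lt (by omega) (by omega)
      omega
    have hsz1 : 1 ≤ L / n := (Int.le_ediv_iff_mul_le (by omega)).mpr (by omega)
    have hLeq : L = n * (L / n) := by
      have h := Int.mul_ediv_add_emod L n
      omega
    have hfd2 : PySem.Int.floordiv L (PySem.Int.floordiv L n) = n := by
      rw [hfd]
      unfold PySem.Int.floordiv
      rw [Int.fdiv_eq_ediv, if_pos (Or.inl (by omega)), sub_zero]
      generalize hg : L / n = k at hsz1 hLeq ⊢
      rw [hLeq, Int.mul_ediv_cancel n (by omega)]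
    rw [hfd2]
    rw [pv_foldA_eq s (PySem.Int.floordiv L n) n (by omega)]
    rw [PySem.List.pyRange_neg_one_eq_reverse, show (0:Int) + 1 = 1 from rfl,
      show n - 1 + 1 = n from by ring]
    cases hbase : PySem.Int.ofChars? (PySem.List.slice s none (some (PySem.Int.floordiv L n))) with
    | none => simp only []; split <;> rfl
    | some base =>
      simp only []
      rw [pv_foldB_eq s (PySem.Int.floordiv L n) base (PySem.List.pyRange 1 n 1)]
      have hwnd : (PySem.List.pyRange 1 n 1).map
            (fun i => (PySem.Int.floordiv L n * i, PySem.Int.floordiv L n * (i + 1)))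
          = (PySem.List.pyRange 1 n 1).map
            (fun i => (PySem.Int.floordiv L n * i, PySem.Int.floordiv L n * i + PySem.Int.floordiv L n)) :=
        List.map_congr_left fun i _ => by simp only [Prod.mk.injEq]; exact ⟨trivial, by ring⟩
      rw [hwnd]
      cases hres : pvParseAll s ((PySem.List.pyRange 1 n 1).map
          (fun i => (PySem.Int.floordiv L n * i, PySem.Int.floordiv L n * i + PySem.Int.floordiv L n))) with
      | none => simp only [Option.map_none]; split <;> rfl
      | some leads =>
        simp only [Option.map_some, List.nil_append]
        by_cases hLone : L = 1
        · rw [if_pos hLone, if_pos hLone]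
        · rw [if_neg hLone, if_neg hLone, pv_aloop_eq_foldr]
  · rw [if_pos hm, if_pos hm]
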